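-- pv_equiv track=rewrite | github.com/lewisir/Advent-of-Code-2025 | Day6/aoc_day6.py | extract_number_column
-- ===== SOURCE A (Python) =====
-- def extract_number_column(data, space_positions):
--     """Return a list of the number strings and the operator"""
--     space_positions.append(len(data[0]))
--     last_separator = 0
--     number_string_columns = []
--     for separator in space_positions:
--         number_list = []
--         for row in data:
--             number_list.append(row[last_separator:separator])
--         last_separator = separator + 1
--         number_string_columns.append(number_list)
--     return number_string_columns
-- ===== SOURCE B (Python) =====
-- def extract_number_column(data, space_positions):
--     """Return a list of the number strings and the operator"""
--     space_positions.append(len(data[0]))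
--     bounds = []
--     start = 0
--     for sep in space_positions:
--         bounds.append((start, sep))
--         start = sep + 1
--     rows = [[row[a:b] for (a, b) in bounds] for row in data]
--     return [list(col) for col in zip(*rows)]
-- ===== Notes on version B (the rewrite author's own statement) =====
-- stated objective: alternative
-- what changed: B precomputes the (start,end) bound pairs once, builds the matrix row-major with a per-row comprehension, and transposes it with zip(*rows), instead of A's column-major nested loops with a running last_separator.
import Mathlib
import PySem

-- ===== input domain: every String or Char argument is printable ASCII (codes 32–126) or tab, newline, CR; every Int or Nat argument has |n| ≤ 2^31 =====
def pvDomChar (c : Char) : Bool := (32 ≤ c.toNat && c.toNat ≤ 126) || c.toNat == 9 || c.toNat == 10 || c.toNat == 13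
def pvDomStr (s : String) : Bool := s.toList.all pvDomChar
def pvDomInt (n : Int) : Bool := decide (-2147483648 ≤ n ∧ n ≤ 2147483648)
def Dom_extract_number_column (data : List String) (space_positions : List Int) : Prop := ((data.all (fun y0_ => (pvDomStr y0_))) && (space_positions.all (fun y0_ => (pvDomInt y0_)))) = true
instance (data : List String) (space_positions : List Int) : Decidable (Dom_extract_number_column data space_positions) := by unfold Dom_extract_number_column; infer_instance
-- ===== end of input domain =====

-- B is an alternative decomposition (bounds pairs + row-major build + transpose), not claimed faster.
-- Both Pythons mutate space_positions by appending len(data[0]); equivalence is about the RETURN value.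

-- ===== PORT A =====
def extract_number_column (data : List String) (space_positions : List Int) : List (List String) :=
  match PySem.List.pyGet? data 0 with
  | none => []   -- data[0] raises IndexError; excluded by Pre_
  | some first =>
    let sps := space_positions ++ [PySem.Str.len first]
    (sps.foldl (fun (st : Int × List (List String)) sep =>
        let numberList := data.foldl (fun acc row => acc ++ [PySem.Str.slice row (some st.1) (some sep)]) []
        (sep + 1, st.2 ++ [numberList]))
      (0, [])).2

-- ===== PORT B =====
-- port of zip(*rows) followed by list(col) on each tuple: truncating transpose
def pvZipStarAux (fuel : Nat) (rows : List (List String)) : List (List String) :=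
  match fuel with
  | 0 => []
  | n+1 =>
    if rows.any List.isEmpty then []
    else (rows.filterMap List.head?) :: pvZipStarAux n (rows.map List.tail)

def pvZipStar (rows : List (List String)) : List (List String) :=
  match rows with
  | [] => []
  | r :: _ => pvZipStarAux r.length rows

def extract_number_column_alt (data : List String) (space_positions : List Int) : List (List String) :=
  match PySem.List.pyGet? data 0 with
  | none => []   -- data[0] raises IndexError; excluded by Pre_
  | some first =>
    let sps := space_positions ++ [PySem.Str.len first]
    let bounds := (sps.foldl (fun (st : Int × List (Int × Int)) sep => (sep + 1, st.2 ++ [(st.1, sep)])) (0, [])).2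
    pvZipStar (data.map (fun row => bounds.map (fun ab => PySem.Str.slice row (some ab.1) (some ab.2))))

-- ===== PRECONDITION & SPEC =====
-- A evaluates data[0]; on empty data it raises IndexError, so Pre_ requires a nonempty data.
def Pre_extract_number_column (data : List String) (space_positions : List Int) : Prop := data ≠ []
instance (data : List String) (space_positions : List Int) : Decidable (Pre_extract_number_column data space_positions) := by unfold Pre_extract_number_column; infer_instance
def pvWitness_extract_number_column : List String × List Int := (["12 34", "56 78"], [2])
def Spec_extract_number_column (data : List String) (space_positions : List Int) (out : List (List String)) : Prop := out = extract_number_column_alt data space_positions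
instance (data : List String) (space_positions : List Int) (out : List (List String)) : Decidable (Spec_extract_number_column data space_positions out) := by unfold Spec_extract_number_column; infer_instance

-- ===== CLAIM (what is proved, stated in full; the proofs are below) =====
def Claim_equal_extract_number_column : Prop := ∀ (data : List String) (space_positions : List Int), Dom_extract_number_column data space_positions → Pre_extract_number_column data space_positions → Spec_extract_number_column data space_positions (extract_number_column data space_positions)

-- ===== LEMMAS AND PROOFS =====

-- the segment bounds determined by a running start and the separator list
def pvSpecBounds (last : Int) : List Int → List (Int × Int)
  | [] => []
  | s :: ss => (last, s) :: pvSpecBounds (s + 1) ss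

theorem pv_foldl_bounds {β : Type} (g : Int → Int → β) :
    ∀ (sps : List Int) (last : Int) (acc : List β),
      (sps.foldl (fun (st : Int × List β) sep => (sep + 1, st.2 ++ [g st.1 sep])) (last, acc)).2
        = acc ++ (pvSpecBounds last sps).map (fun ab => g ab.1 ab.2) := by
  intro sps
  induction sps with
  | nil => intro last acc; simp [pvSpecBounds]
  | cons s ss ih => intro last acc; simp [pvSpecBounds, List.foldl_cons, ih]

theorem pv_foldl_append_map {α β : Type} (f : α → β) :
    ∀ (l : List α) (acc : List β),
      l.foldl (fun acc x => acc ++ [f x]) acc = acc ++ l.map f := by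
  intro l
  induction l with
  | nil => intro acc; simp
  | cons x xs ih => intro acc; simp [List.foldl_cons, ih]

theorem pv_zipStarAux_map (f : String → Int × Int → String) (data : List String)
    (hd : data ≠ []) :
    ∀ (bounds : List (Int × Int)) (fuel : Nat), bounds.length ≤ fuel →
      pvZipStarAux fuel (data.map fun row => bounds.map (f row))
        = bounds.map (fun ab => data.map (fun row => f row ab)) := by
  intro bounds
  induction bounds with
  | nil =>
    intro fuel _
    cases fuel with
    | zero => simp [pvZipStarAux]
    | succ n =>
      obtain ⟨d, ds, rfl⟩ := List.exists_cons_of_ne_nil hd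
      simp [pvZipStarAux]
  | cons ab bs ih =>
    intro fuel hf
    cases fuel with
    | zero => simp at hf
    | succ n =>
      simp only [List.map_cons, pvZipStarAux]
      rw [if_neg (by simp [List.any_map])]
      have hheads : ((data.map fun row => f row ab :: bs.map (f row)).filterMap List.head?)
          = data.map (fun row => f row ab) := by
        simp [List.filterMap_map]
      have htails : ((data.map fun row => f row ab :: bs.map (f row)).map List.tail)
          = data.map (fun row => bs.map (f row)) := by
        simp [List.map_map, Function.comp_def]
      rw [hheads, htails, ih n (by simpa using hf)]

theorem pv_zipStar_map (f : String → Int × Int → String) (data : List String)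
    (hd : data ≠ []) (bounds : List (Int × Int)) :
    pvZipStar (data.map fun row => bounds.map (f row))
      = bounds.map (fun ab => data.map (fun row => f row ab)) := by
  obtain ⟨d, ds, rfl⟩ := List.exists_cons_of_ne_nil hd
  simp only [pvZipStar, List.map_cons]
  have := pv_zipStarAux_map f (d :: ds) (by simp) bounds (fuel := (bounds.map (f d)).length)
    (by simp)
  simpa using this

-- ===== VERDICT (by name: the statement is the Claim_ definition above) =====
theorem extract_number_column_spec : Claim_equal_extract_number_column := by
  intro data sps _ hpre
  unfold Spec_extract_number_column
  obtain ⟨d, ds, rfl⟩ := List.exists_cons_of_ne_nil hpre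
  have h0 : PySem.List.pyGet? (d :: ds) (0 : Int) = some d := by
    simp [PySem.List.pyGet?, PySem.List.pyIdx?]
  simp only [extract_number_column, extract_number_column_alt, h0]
  rw [pv_foldl_bounds (fun a b => ((a : Int), (b : Int))), pv_foldl_bounds
    (fun a b => (d :: ds).foldl (fun acc row => acc ++ [PySem.Str.slice row (some a) (some b)]) [])]
  simp only [List.nil_append]
  rw [show ((pvSpecBounds 0 (sps ++ [PySem.Str.len d])).map
      (fun ab => (ab.1, ab.2))) = pvSpecBounds 0 (sps ++ [PySem.Str.len d]) by simp]
  rw [pv_zipStar_map (fun row ab => PySem.Str.slice row (some ab.1) (some ab.2)) (d :: ds)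
    (by simp)]
  simp only [pv_foldl_append_map, List.nil_append]
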